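-- pv_equiv track=rewrite | github.com/lnenad/grafly | training/variations.py | _vary_label
-- ===== SOURCE A (Python) =====
-- SYNONYMS: dict[str, list[str]] = {
--     # Control flow
--     "Start":          ["Start",       "Begin",       "Entry",        "Init",         "Launch"],
--     "End":            ["End",         "Finish",      "Exit",         "Done",         "Complete"],
--     "Stop":           ["Stop",        "Halt",        "Terminate",    "Abort",        "End"],
--     # Auth / identity
--     "Login":          ["Login",       "Sign In",     "Authenticate", "Log In",       "Auth"],
--     "Logout":         ["Logout",      "Sign Out",    "Deauthenticate","Log Out",     "End Session"],
--     "Register":       ["Register",    "Sign Up",     "Create Account","Enroll",      "Join"],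
--     "Auth":           ["Auth",        "Authenticate","Verify Identity","Authz",      "IAM Check"],
--     "Authorize":      ["Authorize",   "Authz",       "Grant Access", "Permit",       "Allow"],
--     "Validate":       ["Validate",    "Verify",      "Check",        "Inspect",      "Assert"],
--     "Token":          ["Token",       "JWT",         "Access Token", "Bearer",       "Credential"],
--     # Data ops
--     "Fetch":          ["Fetch",       "Read",        "Retrieve",     "Query",        "Load"],
--     "Store":          ["Store",       "Save",        "Persist",      "Write",        "Archive"],
--     "Update":         ["Update",      "Modify",      "Edit",         "Patch",        "Mutate"],
--     "Delete":         ["Delete",      "Remove",      "Purge",        "Drop",         "Erase"],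
--     "Upload":         ["Upload",      "Ingest",      "Import",       "Receive",      "Accept"],
--     "Download":       ["Download",    "Export",      "Extract",      "Pull",         "Retrieve"],
--     "Process":        ["Process",     "Handle",      "Execute",      "Run",          "Compute"],
--     "Transform":      ["Transform",   "Convert",     "Normalize",    "Map",          "Reshape"],
--     "Enrich":         ["Enrich",      "Augment",     "Annotate",     "Append",       "Enhance"],
--     "Ingest":         ["Ingest",      "Collect",     "Capture",      "Receive",      "Accept"],
--     # Infra / services
--     "User":           ["User",        "Client",      "Customer",     "Requester",    "Actor"],
--     "Users":          ["Users",       "Clients",     "Customers",    "Requesters",   "Actors"],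
--     "Server":         ["Server",      "Backend",     "Service",      "App Server",   "Node"],
--     "Gateway":        ["Gateway",     "GW",          "Proxy",        "Entry Point",  "Front Door"],
--     "Queue":          ["Queue",       "Message Queue","Job Queue",   "Task Queue",   "MQ"],
--     "Cache":          ["Cache",       "Redis",       "Memcache",     "Hot Store",    "In-Memory"],
--     "Database":       ["Database",    "DB",          "Data Store",   "Storage",      "Repository"],
--     "Monitor":        ["Monitor",     "Observe",     "Watch",        "Track",        "Measure"],
--     "Notify":         ["Notify",      "Alert",       "Inform",       "Message",      "Send Alert"],
--     "Route":          ["Route",       "Direct",      "Forward",      "Dispatch",     "Relay"],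
--     "Deploy":         ["Deploy",      "Release",     "Publish",      "Ship",         "Rollout"],
--     "Build":          ["Build",       "Compile",     "Package",      "Assemble",     "Bundle"],
--     "Test":           ["Test",        "QA",          "Verify",       "Validate",     "Check"],
--     # Business
--     "Order":          ["Order",       "Purchase",    "Transaction",  "Request",      "Booking"],
--     "Orders":         ["Orders",      "Purchases",   "Transactions", "Requests",     "Bookings"],
--     "Payment":        ["Payment",     "Charge",      "Billing",      "Invoice",      "Settlement"],
--     "Product":        ["Product",     "Item",        "Listing",      "SKU",          "Catalog Item"],
--     "Search":         ["Search",      "Find",        "Lookup",       "Query",        "Discover"],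
--     "Filter":         ["Filter",      "Screen",      "Select",       "Exclude",      "Prune"],
--     "Approve":        ["Approve",     "Accept",      "Confirm",      "Authorize",    "Green-light"],
--     "Reject":         ["Reject",      "Deny",        "Decline",      "Refuse",       "Block"],
--     # State / result
--     "Success":        ["Success",     "Approved",    "Confirmed",    "Accepted",     "OK"],
--     "Error":          ["Error",       "Failure",     "Failed",       "Rejected",     "Exception"],
--     "Pending":        ["Pending",     "In Progress", "Queued",       "Waiting",      "Scheduled"],
--     # Networking / zones
--     "Load Balancer":  ["Load Balancer","ALB",        "LB",           "Traffic Router","Ingress"],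
--     "API Gateway":    ["API Gateway", "API GW",      "REST API",     "HTTP API",     "API Layer"],
--     "CDN":            ["CDN",         "Edge Cache",  "Content Cache","Edge Network", "CDN Edge"],
--     "VPN":            ["VPN",         "Tunnel",      "Private Link", "Secure Tunnel","VPN Link"],
--     # Zones / labels
--     "Compute":        ["Compute",     "Runtime",     "Processing",   "Execution",    "Workers"],
--     "Data":           ["Data",        "Storage",     "Persistence",  "Data Layer",   "Datastore"],
--     "Observability":  ["Observability","Monitoring", "Telemetry",    "Ops",          "Insights"],
--     "Security":       ["Security",    "Auth Layer",  "IAM",          "Access Control","Policy"],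
-- }
--
-- def _vary_label(label: str, variant_idx: int) -> str:
--     """Substitute synonym words/phrases in a label."""
--     if not label:
--         return label
--     slot = variant_idx % 5
--
--     # Full-label match first (handles multi-word keys like "Load Balancer")
--     for key, alts in SYNONYMS.items():
--         if label.strip().lower() == key.lower():
--             return alts[slot]
--
--     # Line-by-line word substitution
--     lines = label.split("\n")
--     out_lines = []
--     for line in lines:
--         words = line.split()
--         i = 0
--         new_words = []
--         while i < len(words):
--             matched = False
--             # Try multi-word keys first (longest first)
--             for key, alts in sorted(SYNONYMS.items(), key=lambda x: -len(x[0].split())):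
--                 key_parts = key.split()
--                 n = len(key_parts)
--                 phrase = " ".join(words[i : i + n])
--                 if phrase.lower() == key.lower():
--                     new_words.append(alts[slot])
--                     i += n
--                     matched = True
--                     break
--             if not matched:
--                 new_words.append(words[i])
--                 i += 1
--         out_lines.append(" ".join(new_words))
--     return "\n".join(out_lines)
-- ===== SOURCE B (Python) =====
-- """Synonym substitution via precomputed hash tables parsed from compact table rows."""
--
-- _TABLE = (
--     "start=Start;Begin;Entry;Init;Launch",
--     "end=End;Finish;Exit;Done;Complete",
--     "stop=Stop;Halt;Terminate;Abort;End",
--     "login=Login;Sign In;Authenticate;Log In;Auth",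
--     "logout=Logout;Sign Out;Deauthenticate;Log Out;End Session",
--     "register=Register;Sign Up;Create Account;Enroll;Join",
--     "auth=Auth;Authenticate;Verify Identity;Authz;IAM Check",
--     "authorize=Authorize;Authz;Grant Access;Permit;Allow",
--     "validate=Validate;Verify;Check;Inspect;Assert",
--     "token=Token;JWT;Access Token;Bearer;Credential",
--     "fetch=Fetch;Read;Retrieve;Query;Load",
--     "store=Store;Save;Persist;Write;Archive",
--     "update=Update;Modify;Edit;Patch;Mutate",
--     "delete=Delete;Remove;Purge;Drop;Erase",
--     "upload=Upload;Ingest;Import;Receive;Accept",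
--     "download=Download;Export;Extract;Pull;Retrieve",
--     "process=Process;Handle;Execute;Run;Compute",
--     "transform=Transform;Convert;Normalize;Map;Reshape",
--     "enrich=Enrich;Augment;Annotate;Append;Enhance",
--     "ingest=Ingest;Collect;Capture;Receive;Accept",
--     "user=User;Client;Customer;Requester;Actor",
--     "users=Users;Clients;Customers;Requesters;Actors",
--     "server=Server;Backend;Service;App Server;Node",
--     "gateway=Gateway;GW;Proxy;Entry Point;Front Door",
--     "queue=Queue;Message Queue;Job Queue;Task Queue;MQ",
--     "cache=Cache;Redis;Memcache;Hot Store;In-Memory",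
--     "database=Database;DB;Data Store;Storage;Repository",
--     "monitor=Monitor;Observe;Watch;Track;Measure",
--     "notify=Notify;Alert;Inform;Message;Send Alert",
--     "route=Route;Direct;Forward;Dispatch;Relay",
--     "deploy=Deploy;Release;Publish;Ship;Rollout",
--     "build=Build;Compile;Package;Assemble;Bundle",
--     "test=Test;QA;Verify;Validate;Check",
--     "order=Order;Purchase;Transaction;Request;Booking",
--     "orders=Orders;Purchases;Transactions;Requests;Bookings",
--     "payment=Payment;Charge;Billing;Invoice;Settlement",
--     "product=Product;Item;Listing;SKU;Catalog Item",
--     "search=Search;Find;Lookup;Query;Discover",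
--     "filter=Filter;Screen;Select;Exclude;Prune",
--     "approve=Approve;Accept;Confirm;Authorize;Green-light",
--     "reject=Reject;Deny;Decline;Refuse;Block",
--     "success=Success;Approved;Confirmed;Accepted;OK",
--     "error=Error;Failure;Failed;Rejected;Exception",
--     "pending=Pending;In Progress;Queued;Waiting;Scheduled",
--     "load balancer=Load Balancer;ALB;LB;Traffic Router;Ingress",
--     "api gateway=API Gateway;API GW;REST API;HTTP API;API Layer",
--     "cdn=CDN;Edge Cache;Content Cache;Edge Network;CDN Edge",
--     "vpn=VPN;Tunnel;Private Link;Secure Tunnel;VPN Link",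
--     "compute=Compute;Runtime;Processing;Execution;Workers",
--     "data=Data;Storage;Persistence;Data Layer;Datastore",
--     "observability=Observability;Monitoring;Telemetry;Ops;Insights",
--     "security=Security;Auth Layer;IAM;Access Control;Policy",
-- )
--
-- _BY_KEY = {}
-- for _entry in _TABLE:
--     _parts = _entry.split("=", 1)
--     _BY_KEY[_parts[0]] = _parts[1].split(";")
--
-- _TWO = {k: v for k, v in _BY_KEY.items() if " " in k}
-- _ONE = {k: v for k, v in _BY_KEY.items() if " " not in k}
--
--
-- def _vary_label(label: str, variant_idx: int) -> str:
--     """Substitute synonym words/phrases in a label."""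
--     if not label:
--         return label
--     slot = variant_idx % 5
--
--     alts = _BY_KEY.get(label.strip().lower())
--     if alts is not None:
--         return alts[slot]
--
--     out_lines = []
--     for line in label.split("\n"):
--         words = line.split()
--         new_words = []
--         i = 0
--         while i < len(words):
--             alts = _TWO.get(" ".join(words[i : i + 2]).lower())
--             if alts is not None:
--                 new_words.append(alts[slot])
--                 i += 2
--                 continue
--             alts = _ONE.get(words[i].lower())
--             if alts is not None:
--                 new_words.append(alts[slot])
--             else:
--                 new_words.append(words[i])
--             i += 1
--         out_lines.append(" ".join(new_words))
--     return "\n".join(out_lines)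
-- ===== Notes on version B (the rewrite author's own statement) =====
-- stated objective: faster
-- what changed: Replaced the per-word scan that re-sorts and linearly searches all 52 synonym entries (lowercasing keys on every comparison) with hash dicts keyed by lowercase phrase (full label, two-word, one-word), built once by parsing a compact table string and probed longest-first by O(1) lookup.
import Mathlib
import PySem

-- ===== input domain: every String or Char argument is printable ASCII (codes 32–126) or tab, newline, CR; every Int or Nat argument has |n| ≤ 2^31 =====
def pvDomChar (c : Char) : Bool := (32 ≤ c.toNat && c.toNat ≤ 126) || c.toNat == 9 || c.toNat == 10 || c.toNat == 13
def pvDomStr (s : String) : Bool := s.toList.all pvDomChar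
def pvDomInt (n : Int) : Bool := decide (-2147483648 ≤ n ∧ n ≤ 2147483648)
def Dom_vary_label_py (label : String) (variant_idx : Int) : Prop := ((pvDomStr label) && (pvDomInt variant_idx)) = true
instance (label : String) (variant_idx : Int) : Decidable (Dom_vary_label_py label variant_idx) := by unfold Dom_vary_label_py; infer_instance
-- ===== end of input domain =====

-- B replaces A's per-word re-sort + linear scan of the synonym table with hash dicts
-- (keyed by lowercase phrase, grouped by phrase length) built once from compact
-- table rows and probed longest-first (objective: faster).

-- ===== PORT A =====
def synonyms : List (String × List String) := [
  ("Start", ["Start", "Begin", "Entry", "Init", "Launch"]),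
  ("End", ["End", "Finish", "Exit", "Done", "Complete"]),
  ("Stop", ["Stop", "Halt", "Terminate", "Abort", "End"]),
  ("Login", ["Login", "Sign In", "Authenticate", "Log In", "Auth"]),
  ("Logout", ["Logout", "Sign Out", "Deauthenticate", "Log Out", "End Session"]),
  ("Register", ["Register", "Sign Up", "Create Account", "Enroll", "Join"]),
  ("Auth", ["Auth", "Authenticate", "Verify Identity", "Authz", "IAM Check"]),
  ("Authorize", ["Authorize", "Authz", "Grant Access", "Permit", "Allow"]),
  ("Validate", ["Validate", "Verify", "Check", "Inspect", "Assert"]),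
  ("Token", ["Token", "JWT", "Access Token", "Bearer", "Credential"]),
  ("Fetch", ["Fetch", "Read", "Retrieve", "Query", "Load"]),
  ("Store", ["Store", "Save", "Persist", "Write", "Archive"]),
  ("Update", ["Update", "Modify", "Edit", "Patch", "Mutate"]),
  ("Delete", ["Delete", "Remove", "Purge", "Drop", "Erase"]),
  ("Upload", ["Upload", "Ingest", "Import", "Receive", "Accept"]),
  ("Download", ["Download", "Export", "Extract", "Pull", "Retrieve"]),
  ("Process", ["Process", "Handle", "Execute", "Run", "Compute"]),
  ("Transform", ["Transform", "Convert", "Normalize", "Map", "Reshape"]),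
  ("Enrich", ["Enrich", "Augment", "Annotate", "Append", "Enhance"]),
  ("Ingest", ["Ingest", "Collect", "Capture", "Receive", "Accept"]),
  ("User", ["User", "Client", "Customer", "Requester", "Actor"]),
  ("Users", ["Users", "Clients", "Customers", "Requesters", "Actors"]),
  ("Server", ["Server", "Backend", "Service", "App Server", "Node"]),
  ("Gateway", ["Gateway", "GW", "Proxy", "Entry Point", "Front Door"]),
  ("Queue", ["Queue", "Message Queue", "Job Queue", "Task Queue", "MQ"]),
  ("Cache", ["Cache", "Redis", "Memcache", "Hot Store", "In-Memory"]),
  ("Database", ["Database", "DB", "Data Store", "Storage", "Repository"]),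
  ("Monitor", ["Monitor", "Observe", "Watch", "Track", "Measure"]),
  ("Notify", ["Notify", "Alert", "Inform", "Message", "Send Alert"]),
  ("Route", ["Route", "Direct", "Forward", "Dispatch", "Relay"]),
  ("Deploy", ["Deploy", "Release", "Publish", "Ship", "Rollout"]),
  ("Build", ["Build", "Compile", "Package", "Assemble", "Bundle"]),
  ("Test", ["Test", "QA", "Verify", "Validate", "Check"]),
  ("Order", ["Order", "Purchase", "Transaction", "Request", "Booking"]),
  ("Orders", ["Orders", "Purchases", "Transactions", "Requests", "Bookings"]),
  ("Payment", ["Payment", "Charge", "Billing", "Invoice", "Settlement"]),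
  ("Product", ["Product", "Item", "Listing", "SKU", "Catalog Item"]),
  ("Search", ["Search", "Find", "Lookup", "Query", "Discover"]),
  ("Filter", ["Filter", "Screen", "Select", "Exclude", "Prune"]),
  ("Approve", ["Approve", "Accept", "Confirm", "Authorize", "Green-light"]),
  ("Reject", ["Reject", "Deny", "Decline", "Refuse", "Block"]),
  ("Success", ["Success", "Approved", "Confirmed", "Accepted", "OK"]),
  ("Error", ["Error", "Failure", "Failed", "Rejected", "Exception"]),
  ("Pending", ["Pending", "In Progress", "Queued", "Waiting", "Scheduled"]),
  ("Load Balancer", ["Load Balancer", "ALB", "LB", "Traffic Router", "Ingress"]),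
  ("API Gateway", ["API Gateway", "API GW", "REST API", "HTTP API", "API Layer"]),
  ("CDN", ["CDN", "Edge Cache", "Content Cache", "Edge Network", "CDN Edge"]),
  ("VPN", ["VPN", "Tunnel", "Private Link", "Secure Tunnel", "VPN Link"]),
  ("Compute", ["Compute", "Runtime", "Processing", "Execution", "Workers"]),
  ("Data", ["Data", "Storage", "Persistence", "Data Layer", "Datastore"]),
  ("Observability", ["Observability", "Monitoring", "Telemetry", "Ops", "Insights"]),
  ("Security", ["Security", "Auth Layer", "IAM", "Access Control", "Policy"])
]

-- alts[slot]: slot = variant_idx % 5 is always in range here, the default is unreachable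
def altAt (alts : List String) (slot : Int) : String :=
  (PySem.List.pyGet? alts slot).getD ""

-- label.split("\n")  (separator is non-empty, so Python never raises)
def splitNL (s : String) : List String :=
  (PySem.Chars.splitOn s.toList "\n".toList).map String.ofList

-- sorted(SYNONYMS.items(), key=lambda x: -len(x[0].split()))
def sortedSyn : List (String × List String) :=
  PySem.List.sorted synonyms (fun x => -(((PySem.Str.split₀ x.1).length : Int))) false

-- termination fact for the while loop: every key in the table has at least one word
theorem sortedSyn_key_pos : ∀ kv ∈ sortedSyn, 1 ≤ (PySem.Str.split₀ kv.1).length := by decide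

-- the inner `while i < len(words)` loop of A, over the suffix words[i:]
def aWords (slot : Int) (ws : List String) : List String :=
  match ws with
  | [] => []
  | w :: rest =>
    match h : sortedSyn.find? (fun kv =>
        PySem.Str.lower (PySem.Str.join " " ((w :: rest).take (PySem.Str.split₀ kv.1).length))
          == PySem.Str.lower kv.1) with
    | some kv => altAt kv.2 slot :: aWords slot ((w :: rest).drop (PySem.Str.split₀ kv.1).length)
    | none => w :: aWords slot rest
termination_by ws.length
decreasing_by
  · have hmem := List.mem_of_find?_eq_some h
    have := sortedSyn_key_pos kv hmem
    simp only [List.length_drop, List.length_cons]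
    omega
  · simp

def vary_label_py (label : String) (variant_idx : Int) : String :=
  if label == "" then label
  else
    let slot := PySem.Int.mod variant_idx 5
    match synonyms.find? (fun kv =>
        PySem.Str.lower (PySem.Str.strip label) == PySem.Str.lower kv.1) with
    | some kv => altAt kv.2 slot
    | none =>
      PySem.Str.join "\n"
        ((splitNL label).map (fun line => PySem.Str.join " " (aWords slot (PySem.Str.split₀ line))))

-- ===== PORT B =====
-- the synonym table as compact rows "key=alt;alt;alt;alt;alt", keys lowercase
def tableRows : List String := [
  "start=Start;Begin;Entry;Init;Launch",
  "end=End;Finish;Exit;Done;Complete",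
  "stop=Stop;Halt;Terminate;Abort;End",
  "login=Login;Sign In;Authenticate;Log In;Auth",
  "logout=Logout;Sign Out;Deauthenticate;Log Out;End Session",
  "register=Register;Sign Up;Create Account;Enroll;Join",
  "auth=Auth;Authenticate;Verify Identity;Authz;IAM Check",
  "authorize=Authorize;Authz;Grant Access;Permit;Allow",
  "validate=Validate;Verify;Check;Inspect;Assert",
  "token=Token;JWT;Access Token;Bearer;Credential",
  "fetch=Fetch;Read;Retrieve;Query;Load",
  "store=Store;Save;Persist;Write;Archive",
  "update=Update;Modify;Edit;Patch;Mutate",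
  "delete=Delete;Remove;Purge;Drop;Erase",
  "upload=Upload;Ingest;Import;Receive;Accept",
  "download=Download;Export;Extract;Pull;Retrieve",
  "process=Process;Handle;Execute;Run;Compute",
  "transform=Transform;Convert;Normalize;Map;Reshape",
  "enrich=Enrich;Augment;Annotate;Append;Enhance",
  "ingest=Ingest;Collect;Capture;Receive;Accept",
  "user=User;Client;Customer;Requester;Actor",
  "users=Users;Clients;Customers;Requesters;Actors",
  "server=Server;Backend;Service;App Server;Node",
  "gateway=Gateway;GW;Proxy;Entry Point;Front Door",
  "queue=Queue;Message Queue;Job Queue;Task Queue;MQ",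
  "cache=Cache;Redis;Memcache;Hot Store;In-Memory",
  "database=Database;DB;Data Store;Storage;Repository",
  "monitor=Monitor;Observe;Watch;Track;Measure",
  "notify=Notify;Alert;Inform;Message;Send Alert",
  "route=Route;Direct;Forward;Dispatch;Relay",
  "deploy=Deploy;Release;Publish;Ship;Rollout",
  "build=Build;Compile;Package;Assemble;Bundle",
  "test=Test;QA;Verify;Validate;Check",
  "order=Order;Purchase;Transaction;Request;Booking",
  "orders=Orders;Purchases;Transactions;Requests;Bookings",
  "payment=Payment;Charge;Billing;Invoice;Settlement",
  "product=Product;Item;Listing;SKU;Catalog Item",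
  "search=Search;Find;Lookup;Query;Discover",
  "filter=Filter;Screen;Select;Exclude;Prune",
  "approve=Approve;Accept;Confirm;Authorize;Green-light",
  "reject=Reject;Deny;Decline;Refuse;Block",
  "success=Success;Approved;Confirmed;Accepted;OK",
  "error=Error;Failure;Failed;Rejected;Exception",
  "pending=Pending;In Progress;Queued;Waiting;Scheduled",
  "load balancer=Load Balancer;ALB;LB;Traffic Router;Ingress",
  "api gateway=API Gateway;API GW;REST API;HTTP API;API Layer",
  "cdn=CDN;Edge Cache;Content Cache;Edge Network;CDN Edge",
  "vpn=VPN;Tunnel;Private Link;Secure Tunnel;VPN Link",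
  "compute=Compute;Runtime;Processing;Execution;Workers",
  "data=Data;Storage;Persistence;Data Layer;Datastore",
  "observability=Observability;Monitoring;Telemetry;Ops;Insights",
  "security=Security;Auth Layer;IAM;Access Control;Policy"
]

-- _BY_KEY[parts[0]] = parts[1].split(";") for each row (parts[0]/parts[1]: every row of
-- the literal table contains '=', so the List.getD defaults are unreachable; exact)
def parsedEntries : List (String × List String) :=
  tableRows.map (fun entry =>
    let parts := PySem.Chars.splitOnMax entry.toList "=".toList 1
    (String.ofList (parts.getD 0 []),
     (PySem.Chars.splitOn (parts.getD 1 []) ";".toList).map String.ofList))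

def byKeyDict : PySem.Dict String (List String) :=
  PySem.Dict.ofList parsedEntries

-- _TWO = {k: v for k, v in _BY_KEY.items() if " " in k}
def twoDict : PySem.Dict String (List String) :=
  PySem.Dict.ofList (byKeyDict.items.filter (fun kv => PySem.Str.isIn " " kv.1))

-- _ONE = {k: v for k, v in _BY_KEY.items() if " " not in k}
def oneDict : PySem.Dict String (List String) :=
  PySem.Dict.ofList (byKeyDict.items.filter (fun kv => !(PySem.Str.isIn " " kv.1)))

-- alts[slot] in B (slot always in range, default unreachable)
def pick (alts : List String) (slot : Int) : String :=
  (PySem.List.pyGet? alts slot).getD ""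

-- B's while loop: probe the two-word dict, then the one-word dict
set_option maxRecDepth 100000 in
set_option maxHeartbeats 8000000 in
def bWords (slot : Int) (ws : List String) : List String :=
  match ws with
  | [] => []
  | w :: rest =>
    match twoDict.get? (PySem.Str.lower (PySem.Str.join " " ((w :: rest).take 2))) with
    | some alts => pick alts slot :: bWords slot (rest.drop 1)
    | none =>
      match oneDict.get? (PySem.Str.lower w) with
      | some alts => pick alts slot :: bWords slot rest
      | none => w :: bWords slot rest
termination_by ws.length
decreasing_by
  · simp only [List.length_drop, List.length_cons]; omega
  · simp

def vary_label_py_alt (label : String) (variant_idx : Int) : String :=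
  if label == "" then label
  else
    let slot := PySem.Int.mod variant_idx 5
    match byKeyDict.get? (PySem.Str.lower (PySem.Str.strip label)) with
    | some alts => pick alts slot
    | none =>
      PySem.Str.join "\n"
        ((splitNL label).map (fun line => PySem.Str.join " " (bWords slot (PySem.Str.split₀ line))))

-- ===== PRECONDITION & SPEC =====
def Spec_vary_label_py (label : String) (variant_idx : Int) (out : String) : Prop := out = vary_label_py_alt label variant_idx
instance (label : String) (variant_idx : Int) (out : String) : Decidable (Spec_vary_label_py label variant_idx out) := by unfold Spec_vary_label_py; infer_instance

-- ===== CLAIM (what is proved, stated in full; the proofs are below) =====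
def Claim_equal_vary_label_py : Prop := ∀ (label : String) (variant_idx : Int), Dom_vary_label_py label variant_idx → Spec_vary_label_py label variant_idx (vary_label_py label variant_idx)

-- ===== LEMMAS AND PROOFS =====

-- the two-word-key and one-word-key rows of A's table, in table order (proof-side only)
def synTwoL : List (String × List String) :=
  synonyms.filter (fun kv => (PySem.Str.split₀ kv.1).length == 2)
def synOneL : List (String × List String) :=
  synonyms.filter (fun kv => (PySem.Str.split₀ kv.1).length == 1)

-- A's sorted table is exactly: the two-word keys (in table order), then the one-word keys
theorem sortedSyn_split : sortedSyn = synTwoL ++ synOneL := by decide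

theorem synTwoL_len : ∀ kv ∈ synTwoL, (PySem.Str.split₀ kv.1).length = 2 := by decide

theorem synOneL_len : ∀ kv ∈ synOneL, (PySem.Str.split₀ kv.1).length = 1 := by decide

-- parsing the compact rows yields exactly the lower-keyed copy of A's table
set_option maxRecDepth 100000 in
set_option maxHeartbeats 2000000 in
theorem parsed_eq : parsedEntries = synonyms.map (fun kv => (PySem.Str.lower kv.1, kv.2)) := by decide

set_option maxRecDepth 100000 in
set_option maxHeartbeats 2000000 in
theorem byKeyDict_mk :
    byKeyDict = PySem.Dict.mk (synonyms.map (fun kv => (PySem.Str.lower kv.1, kv.2))) := by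
  unfold byKeyDict
  rw [parsed_eq]
  decide

set_option maxRecDepth 100000 in
set_option maxHeartbeats 2000000 in
theorem twoDict_mk :
    twoDict = PySem.Dict.mk (synTwoL.map (fun kv => (PySem.Str.lower kv.1, kv.2))) := by
  unfold twoDict
  rw [byKeyDict_mk]
  decide

set_option maxRecDepth 100000 in
set_option maxHeartbeats 2000000 in
theorem oneDict_mk :
    oneDict = PySem.Dict.mk (synOneL.map (fun kv => (PySem.Str.lower kv.1, kv.2))) := by
  unfold oneDict
  rw [byKeyDict_mk]
  decide

-- a literal dict is a first-match association lookup
theorem get?_mk_find (l : List (String × List String)) (q : String) :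
    (PySem.Dict.mk l).get? q = (l.find? (fun kv => q == kv.1)).map (·.2) := by
  induction l with
  | nil => simp [PySem.Dict.get?]
  | cons h t ih =>
    obtain ⟨k, v⟩ := h
    rw [PySem.Dict.get?_mk_cons, List.find?_cons]
    cases hh : (k == q) <;> cases hh2 : (q == k) <;> simp_all

-- lookup in the lowercased dict = first scan comparing against lowercased keys
theorem get_lower (L : List (String × List String)) (q : String) :
    (PySem.Dict.mk (L.map (fun kv => (PySem.Str.lower kv.1, kv.2)))).get? q
      = (L.find? (fun kv => q == PySem.Str.lower kv.1)).map (·.2) := by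
  rw [get?_mk_find, List.find?_map, Option.map_map]
  rfl

theorem find?_congr_mem {α : Type} (l : List α) (p q : α → Bool)
    (h : ∀ x ∈ l, p x = q x) : l.find? p = l.find? q := by
  induction l with
  | nil => rfl
  | cons a t ih =>
    rw [List.find?_cons, List.find?_cons, h a (List.mem_cons_self)]
    cases hqa : q a <;> simp [ih (fun x hx => h x (List.mem_cons_of_mem _ hx))]

theorem join_single (w : String) : PySem.Str.join " " [w] = w := by
  simp [PySem.Str.join, PySem.Chars.join, List.intercalate]

-- on the two-word block, A's phrase is always words[i:i+2]
theorem findTwo (ws : List String) :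
    synTwoL.find? (fun kv =>
        PySem.Str.lower (PySem.Str.join " " (ws.take (PySem.Str.split₀ kv.1).length))
          == PySem.Str.lower kv.1)
      = synTwoL.find? (fun kv =>
        PySem.Str.lower (PySem.Str.join " " (ws.take 2)) == PySem.Str.lower kv.1) :=
  find?_congr_mem _ _ _ (fun kv hm => by rw [synTwoL_len kv hm])

-- on the one-word block, A's phrase is the single word words[i]
theorem findOne (w : String) (rest : List String) :
    synOneL.find? (fun kv =>
        PySem.Str.lower (PySem.Str.join " " ((w :: rest).take (PySem.Str.split₀ kv.1).length))
          == PySem.Str.lower kv.1)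
      = synOneL.find? (fun kv => PySem.Str.lower w == PySem.Str.lower kv.1) :=
  find?_congr_mem _ _ _ (fun kv hm => by rw [synOneL_len kv hm]; simp [join_single])

-- the two while loops agree
set_option maxRecDepth 100000 in
theorem words_eq (slot : Int) (ws : List String) : aWords slot ws = bWords slot ws := by
  induction hn : ws.length using Nat.strong_induction_on generalizing ws with
  | _ n ih =>
  subst hn
  match ws with
  | [] => rw [aWords, bWords]
  | w :: rest =>
    rw [aWords.eq_def, bWords.eq_def]
    dsimp only
    rw [sortedSyn_split, List.find?_append, findTwo, findOne, twoDict_mk, oneDict_mk,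
      get_lower, get_lower]
    cases hf2 : synTwoL.find? (fun kv =>
        PySem.Str.lower (PySem.Str.join " " ((w :: rest).take 2)) == PySem.Str.lower kv.1) with
    | some kv =>
      have hlen := synTwoL_len kv (List.mem_of_find?_eq_some hf2)
      have hdrop : (w :: rest).drop 2 = rest.drop 1 := rfl
      rw [Option.some_or, Option.map_some]
      dsimp only
      rw [hlen, hdrop]
      exact congrArg _ (ih _ (by simp only [List.length_drop, List.length_cons]; omega) _ rfl)
    | none =>
      rw [Option.none_or, Option.map_none]
      cases hf1 : synOneL.find? (fun kv => PySem.Str.lower w == PySem.Str.lower kv.1) with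
      | some kv =>
        have hlen := synOneL_len kv (List.mem_of_find?_eq_some hf1)
        rw [Option.map_some]
        dsimp only
        rw [hlen]
        have hdrop : (w :: rest).drop 1 = rest := rfl
        rw [hdrop]
        exact congrArg _ (ih _ (by simp) _ rfl)
      | none =>
        rw [Option.map_none]
        dsimp only
        exact congrArg _ (ih _ (by simp) _ rfl)

-- ===== VERDICT (by name: the statement is the Claim_ definition above) =====
set_option maxRecDepth 100000 in
theorem vary_label_py_spec : Claim_equal_vary_label_py := by
  intro label vi _
  unfold Spec_vary_label_py vary_label_py vary_label_py_alt
  by_cases h0 : (label == "") = true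
  · rw [if_pos h0, if_pos h0]
  · rw [if_neg h0, if_neg h0]
    rw [byKeyDict_mk, get_lower]
    cases hf : synonyms.find? (fun kv =>
        PySem.Str.lower (PySem.Str.strip label) == PySem.Str.lower kv.1) with
    | some kv => rw [Option.map_some]; rfl
    | none =>
      rw [Option.map_none]
      dsimp only
      simp only [words_eq]
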